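-- pv_equiv track=rewrite | github.com/dp-web4/HRM | policy/export_training_data.py | create_fewshot_examples
-- ===== SOURCE A (Python) =====
-- def create_fewshot_examples(corrections: list, max_examples: int = 8) -> list:
--     """
--     Select best corrections for few-shot examples.
--
--     Criteria:
--     - Decision diversity (cover all decision types)
--     - Scenario diversity (cover different situations)
--     - Quality reasoning (clear, complete explanations)
--     """
--
--     # Group by decision type
--     by_decision = {}
--     for correction in corrections:
--         decision = correction['review_decision']
--         if decision not in by_decision:
--             by_decision[decision] = []
--         by_decision[decision].append(correction)
--
--     # Select examples
--     examples = []
--     decision_types = list(by_decision.keys())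
--
--     # Round-robin selection for diversity
--     while len(examples) < max_examples and any(by_decision.values()):
--         for decision_type in decision_types:
--             if by_decision[decision_type]:
--                 examples.append(by_decision[decision_type].pop(0))
--                 if len(examples) >= max_examples:
--                     break
--
--     return examples
-- ===== SOURCE B (Python) =====
-- def create_fewshot_examples(corrections: list, max_examples: int = 8) -> list:
--     """Select best corrections for few-shot examples (round-robin over decision types)."""
--     # Group by decision type (same grouping pass as before)
--     by_decision = {}
--     for correction in corrections:
--         decision = correction['review_decision']
--         if decision not in by_decision:
--             by_decision[decision] = []
--         by_decision[decision].append(correction)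
--
--     # Column-major transpose of the groups gives the round-robin order;
--     # no list mutation, no while/any probe.
--     groups = list(by_decision.values())
--     width = max((len(g) for g in groups), default=0)
--     examples = [g[i] for i in range(width) for g in groups if i < len(g)]
--     return examples[:max(0, max_examples)]
-- ===== Notes on version B (the rewrite author's own statement) =====
-- stated objective: simpler
-- what changed: The destructive while/pop(0) round-robin with its any() probe is replaced by a single column-major transpose comprehension over the grouped lists (index-based, no mutation), sliced to max(0, max_examples).
import Mathlib
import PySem

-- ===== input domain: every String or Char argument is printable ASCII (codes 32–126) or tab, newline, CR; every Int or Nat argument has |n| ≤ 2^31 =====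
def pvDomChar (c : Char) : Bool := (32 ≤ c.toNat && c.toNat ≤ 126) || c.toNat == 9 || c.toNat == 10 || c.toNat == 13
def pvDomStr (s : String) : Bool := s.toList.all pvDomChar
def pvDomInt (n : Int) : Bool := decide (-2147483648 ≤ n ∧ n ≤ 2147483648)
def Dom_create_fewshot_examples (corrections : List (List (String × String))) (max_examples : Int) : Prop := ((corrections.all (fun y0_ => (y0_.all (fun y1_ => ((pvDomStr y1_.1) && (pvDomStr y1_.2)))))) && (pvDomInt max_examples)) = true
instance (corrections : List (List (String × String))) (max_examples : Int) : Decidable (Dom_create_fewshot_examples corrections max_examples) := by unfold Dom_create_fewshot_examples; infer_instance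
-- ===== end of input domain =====

-- B changes only the selection phase: the destructive while/pop(0) round-robin becomes a
-- column-major transpose comprehension over the (identically) grouped lists, sliced to max(0, max_examples).

-- ===== PORT A =====
-- the inner 'for decision_type in decision_types' loop (with its pop(0), append and break)
def pvAFor (maxE : Int) :
    List String → PySem.Dict String (List (List (String × String))) → List (List (String × String)) →
    PySem.Dict String (List (List (String × String))) × List (List (String × String))
  | [], d, ex => (d, ex)
  | dt :: rest, d, ex =>
    match d.getD dt [] with
    | [] => pvAFor maxE rest d ex                                -- group empty: skip
    | x :: gs =>
      let d' := d.insert dt gs                                   -- .pop(0) mutates the stored list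
      let ex' := ex ++ [x]                                       -- examples.append(...)
      if maxE ≤ (ex'.length : Int) then (d', ex')                -- break
      else pvAFor maxE rest d' ex'

-- the outer while loop; fuel is only a totality guard (one element is popped per iteration)
def pvAWhile (maxE : Int) (dts : List String) :
    Nat → PySem.Dict String (List (List (String × String))) → List (List (String × String)) →
    List (List (String × String))
  | 0, _, ex => ex
  | fuel + 1, d, ex =>
    if (ex.length : Int) < maxE ∧ d.values.any (fun g => !g.isEmpty) then
      let p := pvAFor maxE dts d ex
      pvAWhile maxE dts fuel p.1 p.2
    else ex

def create_fewshot_examples (corrections : List (List (String × String))) (max_examples : Int) : List (List (String × String)) :=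
  let by_decision := corrections.foldl (fun d correction =>
    let decision := (PySem.Dict.mk correction).getD "review_decision" ""  -- KeyError excluded by Pre_
    let d := if d.contains decision then d else d.insert decision []
    d.modify decision [] (fun g => g ++ [correction])) PySem.Dict.empty
  let decision_types := by_decision.keys
  pvAWhile max_examples decision_types ((by_decision.values.map List.length).sum) by_decision []

-- ===== PORT B =====
def create_fewshot_examples_alt (corrections : List (List (String × String))) (max_examples : Int) : List (List (String × String)) :=
  let by_decision := corrections.foldl (fun d correction =>
    let decision := (PySem.Dict.mk correction).getD "review_decision" ""  -- KeyError excluded by Pre_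
    let d := if d.contains decision then d else d.insert decision []
    d.modify decision [] (fun g => g ++ [correction])) PySem.Dict.empty
  let groups := by_decision.values
  let width := groups.foldr (fun g m => max g.length m) 0
  let examples := (List.range width).flatMap (fun i => groups.filterMap (fun g => g[i]?))
  examples.take (max 0 max_examples).toNat

-- ===== PRECONDITION & SPEC =====
-- Pre_ excludes exactly the corrections lacking a 'review_decision' key, on which A raises KeyError.
def Pre_create_fewshot_examples (corrections : List (List (String × String))) (max_examples : Int) : Prop :=
  corrections.all (fun c => c.any (fun p => p.1 == "review_decision")) = true
instance (corrections : List (List (String × String))) (max_examples : Int) : Decidable (Pre_create_fewshot_examples corrections max_examples) := by unfold Pre_create_fewshot_examples; infer_instance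
def pvWitness_create_fewshot_examples : (List (List (String × String))) × Int :=
  ([[("review_decision", "approve")], [("review_decision", "reject")], [("review_decision", "approve")]], 2)

def Spec_create_fewshot_examples (corrections : List (List (String × String))) (max_examples : Int) (out : List (List (String × String))) : Prop := out = create_fewshot_examples_alt corrections max_examples
instance (corrections : List (List (String × String))) (max_examples : Int) (out : List (List (String × String))) : Decidable (Spec_create_fewshot_examples corrections max_examples out) := by unfold Spec_create_fewshot_examples; infer_instance

-- ===== CLAIM (what is proved, stated in full; the proofs are below) =====
def Claim_equal_create_fewshot_examples : Prop := ∀ (corrections : List (List (String × String))) (max_examples : Int), Dom_create_fewshot_examples corrections max_examples → Pre_create_fewshot_examples corrections max_examples → Spec_create_fewshot_examples corrections max_examples (create_fewshot_examples corrections max_examples)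

-- ===== LEMMAS AND PROOFS =====

-- list-level mirror of the inner for-pass: (groups after, examples after)
def pvRRFor (maxE : Int) : List (List (List (String × String))) → List (List (String × String)) →
    List (List (List (String × String))) × List (List (String × String))
  | [], ex => ([], ex)
  | g :: rest, ex =>
    match g with
    | [] => let p := pvRRFor maxE rest ex; ([] :: p.1, p.2)
    | x :: gs =>
      let ex' := ex ++ [x]
      if maxE ≤ (ex'.length : Int) then (gs :: rest, ex')
      else let p := pvRRFor maxE rest ex'; (gs :: p.1, p.2)

-- list-level mirror of the while loop
def pvRRWhile (maxE : Int) : Nat → List (List (List (String × String))) → List (List (String × String)) →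
    List (List (String × String))
  | 0, _, ex => ex
  | fuel + 1, gs, ex =>
    if (ex.length : Int) < maxE ∧ gs.any (fun g => !g.isEmpty) then
      let p := pvRRFor maxE gs ex
      pvRRWhile maxE fuel p.1 p.2
    else ex

def pvWidth (gs : List (List (List (String × String)))) : Nat := gs.foldr (fun g m => max g.length m) 0
def pvColFlat (w : Nat) (gs : List (List (List (String × String)))) : List (List (String × String)) :=
  (List.range w).flatMap (fun i => gs.filterMap (fun g => g[i]?))

lemma pvRRFor_snd (maxE : Int) (gs : List (List (List (String × String)))) : ∀ (ex : List (List (String × String))),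
    (ex.length : Int) < maxE →
    (pvRRFor maxE gs ex).2 = ex ++ (gs.filterMap (fun g => g.head?)).take (maxE - ex.length).toNat := by
  induction gs with
  | nil => intro ex h; simp [pvRRFor]
  | cons g rest ih =>
    intro ex h
    match g with
    | [] => simpa [pvRRFor] using ih ex h
    | x :: gs' =>
      simp only [pvRRFor, List.filterMap_cons, List.head?_cons]
      split
      · rename_i hle
        simp only [List.length_append, List.length_cons, List.length_nil] at hle
        push_cast at hle
        have : (maxE - ex.length).toNat = 1 := by omega
        simp [this]
      · rename_i hlt
        push Not at hlt
        have h' : ((ex ++ [x]).length : Int) < maxE := by simpa using hlt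
        rw [ih _ h']
        have h1 : (maxE - ex.length).toNat = (maxE - (ex ++ [x]).length).toNat + 1 := by
          simp only [List.length_append, List.length_cons, List.length_nil]; omega
        simp [h1]

lemma pvRRFor_fst (maxE : Int) (gs : List (List (List (String × String)))) : ∀ (ex : List (List (String × String))),
    (ex.length : Int) + (gs.filterMap (fun g => g.head?)).length < maxE →
    (pvRRFor maxE gs ex).1 = gs.map List.tail := by
  induction gs with
  | nil => intro ex h; simp [pvRRFor]
  | cons g rest ih =>
    intro ex h
    match g with
    | [] => simp only [List.filterMap_cons, List.head?_nil] at h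
            simpa [pvRRFor] using ih ex h
    | x :: gs' =>
      simp only [List.filterMap_cons, List.head?_cons, List.length_cons] at h
      simp only [pvRRFor]
      split
      · rename_i hle; exfalso; simp at hle; omega
      · have h' : (((ex ++ [x]).length : Int)) + (rest.filterMap (fun g => g.head?)).length < maxE := by
          simp; push_cast at h ⊢; omega
        simp [ih _ h']

lemma pvSum_tail (gs : List (List (List (String × String)))) :
    ((gs.map List.tail).map List.length).sum + (gs.filterMap (fun g => g.head?)).length = (gs.map List.length).sum := by
  induction gs with
  | nil => simp
  | cons g rest ih =>
    match g with
    | [] => simp only [List.map_cons, List.filterMap_cons, List.head?_nil, List.sum_cons,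
                    List.tail_nil, List.length_nil] at ih ⊢; omega
    | x :: gs' => simp only [List.map_cons, List.filterMap_cons, List.head?_cons, List.sum_cons,
                    List.length_cons, List.tail_cons] at ih ⊢; omega

lemma pvWidth_tail (gs : List (List (List (String × String)))) : pvWidth (gs.map List.tail) = pvWidth gs - 1 := by
  induction gs with
  | nil => simp [pvWidth]
  | cons g rest ih =>
    simp only [pvWidth, List.map_cons, List.foldr_cons] at ih ⊢
    rw [ih]
    have : g.tail.length = g.length - 1 := by simp
    rw [this]; omega

lemma pvWidth_zero (gs : List (List (List (String × String)))) (h : gs.any (fun g => !g.isEmpty) = false) : pvWidth gs = 0 := by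
  induction gs with
  | nil => simp [pvWidth]
  | cons g rest ih =>
    simp only [List.any_cons, Bool.or_eq_false_iff, Bool.not_eq_false'] at h
    have h2 := ih h.2
    simp only [pvWidth, List.foldr_cons] at h2 ⊢
    rw [h2, List.isEmpty_iff.mp h.1]; simp

lemma pvColFlat_succ (w : Nat) (gs : List (List (List (String × String)))) :
    pvColFlat (w + 1) gs = gs.filterMap (fun g => g.head?) ++ pvColFlat w (gs.map List.tail) := by
  simp only [pvColFlat, List.range_succ_eq_map, List.flatMap_cons]
  congr 1
  · apply List.filterMap_congr; intro g _; rw [List.head?_eq_getElem?]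
  · rw [List.flatMap_map]
    apply List.flatMap_congr; intro i _
    rw [List.filterMap_map]
    apply List.filterMap_congr; intro g _
    simp [List.getElem?_tail]


lemma pvHeads_len_pos (gs : List (List (List (String × String)))) (h : gs.any (fun g => !g.isEmpty) = true) :
    0 < (gs.filterMap (fun g => g.head?)).length := by
  induction gs with
  | nil => simp at h
  | cons g rest ih =>
    match g with
    | [] => simp only [List.any_cons] at h; simp only [List.isEmpty_nil] at h
            simp only [List.filterMap_cons, List.head?_nil]
            exact ih (by simpa using h)
    | x :: gs' => simp [List.filterMap_cons]

lemma pvHeads_le_width (gs : List (List (List (String × String)))) (h : gs.any (fun g => !g.isEmpty) = true) :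
    1 ≤ pvWidth gs := by
  induction gs with
  | nil => simp at h
  | cons g rest ih =>
    simp only [List.any_cons, Bool.or_eq_true, Bool.not_eq_eq_eq_not, Bool.not_false] at h
    simp only [pvWidth, List.foldr_cons]
    rcases h with h | h
    · have : g ≠ [] := by simpa [List.isEmpty_iff] using h
      have : 0 < g.length := List.length_pos_iff.mpr this
      omega
    · have := ih (by simpa using h)
      simp only [pvWidth] at this; omega

lemma pvRRWhile_take (maxE : Int) (fuel : Nat) : ∀ (gs : List (List (List (String × String)))) (ex : List (List (String × String))),
    (gs.map List.length).sum ≤ fuel →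
    pvRRWhile maxE fuel gs ex = ex ++ (pvColFlat (pvWidth gs) gs).take (maxE - ex.length).toNat := by
  induction fuel with
  | zero =>
    intro gs ex hf
    -- sum = 0: every group empty, colflat empty
    have hall : ∀ g ∈ gs, g = [] := by
      intro g hg
      have : g.length = 0 := by
        by_contra hne
        have h1 : 1 ≤ g.length := by omega
        have : g.length ≤ (gs.map List.length).sum := List.le_sum_of_mem (List.mem_map_of_mem hg)
        omega
      simpa [List.length_eq_zero_iff] using this
    have hw : pvWidth gs = 0 := by
      apply pvWidth_zero
      simp only [List.any_eq_false]
      intro g hg; simp [hall g hg]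
    simp [pvRRWhile, hw, pvColFlat]
  | succ fuel ih =>
    intro gs ex hf
    simp only [pvRRWhile]
    split
    · rename_i hcond
      obtain ⟨hlen, hany⟩ := hcond
      set h := (gs.filterMap (fun g => g.head?)).length with hh
      have hw1 : 1 ≤ pvWidth gs := pvHeads_le_width gs hany
      have hpos : 0 < h := pvHeads_len_pos gs hany
      have hcf : pvColFlat (pvWidth gs) gs
          = gs.filterMap (fun g => g.head?) ++ pvColFlat (pvWidth gs - 1) (gs.map List.tail) := by
        have : pvWidth gs = (pvWidth gs - 1) + 1 := by omega
        rw [this, pvColFlat_succ]; simp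
      by_cases hbr : maxE ≤ (ex.length : Int) + h
      -- break inside the pass (or exact fill): loop exits next time
      · have hsnd := pvRRFor_snd maxE gs ex hlen
        have hlen2 : ((pvRRFor maxE gs ex).2.length : Int) = maxE := by
          rw [hsnd]; simp only [List.length_append, List.length_take]
          push_cast; omega
        have : pvRRWhile maxE fuel (pvRRFor maxE gs ex).1 (pvRRFor maxE gs ex).2 = (pvRRFor maxE gs ex).2 := by
          cases fuel with
          | zero => simp [pvRRWhile]
          | succ f => simp only [pvRRWhile]; rw [if_neg]; intro hc; omega
        rw [this, hsnd, hcf]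
        rw [List.take_append_of_le_length]
        · omega
      · push Not at hbr
        have hsnd := pvRRFor_snd maxE gs ex hlen
        have hfst := pvRRFor_fst maxE gs ex (by omega)
        have htk : ((gs.filterMap (fun g => g.head?)).take (maxE - ↑ex.length).toNat)
            = gs.filterMap (fun g => g.head?) := by
          apply List.take_of_length_le; omega
        rw [htk] at hsnd
        have hsum := pvSum_tail gs
        
        have ihr := ih (gs.map List.tail) (pvRRFor maxE gs ex).2 (by omega)
        rw [hfst, ihr, hsnd, hcf, pvWidth_tail]
        rw [List.take_append]
        have h1 : (gs.filterMap (fun g => g.head?)).take (maxE - ↑ex.length).toNat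
            = gs.filterMap (fun g => g.head?) := htk
        rw [h1]
        have h2 : ((maxE - ↑(ex ++ gs.filterMap (fun g => g.head?)).length).toNat)
            = (maxE - ↑ex.length).toNat - (gs.filterMap (fun g => g.head?)).length := by
          simp only [List.length_append]; push_cast; omega
        rw [h2, List.append_assoc]
    · rename_i hcond
      rw [Decidable.not_and_iff_not_or_not] at hcond
      rcases hcond with hc | hc
      · push Not at hc
        have : (maxE - (ex.length:Int)).toNat = 0 := by omega
        simp [this]
      · have : gs.any (fun g => !g.isEmpty) = false := by
          revert hc
          cases gs.any (fun g => !g.isEmpty) <;> simp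
        rw [pvWidth_zero gs this]
        simp [pvColFlat]

lemma pvAFor_spec (maxE : Int) : ∀ (ks : List String) (d : PySem.Dict String (List (List (String × String))))
    (ex : List (List (String × String))), ks.Nodup → (∀ k ∈ ks, d.contains k = true) →
    (pvAFor maxE ks d ex).1.keys = d.keys ∧
    ks.map (fun k => (pvAFor maxE ks d ex).1.getD k []) = (pvRRFor maxE (ks.map (fun k => d.getD k [])) ex).1 ∧
    (∀ j, j ∉ ks → (pvAFor maxE ks d ex).1.getD j [] = d.getD j []) ∧
    (pvAFor maxE ks d ex).2 = (pvRRFor maxE (ks.map (fun k => d.getD k [])) ex).2 := by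
  intro ks
  induction ks with
  | nil => intro d ex _ _; simp [pvAFor, pvRRFor]
  | cons k rest ih =>
    intro d ex hnd hc
    have hkrest : k ∉ rest := (List.nodup_cons.mp hnd).1
    have hndr : rest.Nodup := (List.nodup_cons.mp hnd).2
    cases hg : d.getD k [] with
    | nil =>
      have hA : pvAFor maxE (k :: rest) d ex = pvAFor maxE rest d ex := by
        simp [pvAFor, hg]
      have hR : pvRRFor maxE ((k :: rest).map (fun k => d.getD k [])) ex
          = ([] :: (pvRRFor maxE (rest.map (fun k => d.getD k [])) ex).1,
             (pvRRFor maxE (rest.map (fun k => d.getD k [])) ex).2) := by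
        simp [pvRRFor, hg]
      obtain ⟨i1, i2, i3, i4⟩ := ih d ex hndr (fun k' h' => hc k' (List.mem_cons_of_mem _ h'))
      refine ⟨by rw [hA]; exact i1, ?_, ?_, ?_⟩
      · rw [hA, hR]
        simp only [List.map_cons, List.cons.injEq]
        exact ⟨by rw [i3 k hkrest, hg], i2⟩
      · intro j hj
        rw [hA]
        exact i3 j (fun h' => hj (List.mem_cons_of_mem _ h'))
      · rw [hA, hR]; exact i4
    | cons x gs =>
      have hne : ∀ k' ∈ rest, k' ≠ k := fun k' h' he => hkrest (he ▸ h')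
      have hmapeq : rest.map (fun k' => (d.insert k gs).getD k' []) = rest.map (fun k' => d.getD k' []) :=
        List.map_congr_left (fun k' h' => PySem.Dict.getD_insert_of_ne d gs [] (hne k' h'))
      have hkeys1 : (d.insert k gs).keys = d.keys :=
        PySem.Dict.keys_insert_of_contains d gs (hc k List.mem_cons_self)
      by_cases hbr : maxE ≤ ((ex ++ [x]).length : Int)
      · have hA : pvAFor maxE (k :: rest) d ex = (d.insert k gs, ex ++ [x]) := by
          simp only [pvAFor]
          rw [hg]
          dsimp only
          rw [if_pos hbr]
        have hR : pvRRFor maxE ((k :: rest).map (fun k => d.getD k [])) ex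
            = (gs :: rest.map (fun k => d.getD k []), ex ++ [x]) := by
          rw [List.map_cons, hg]
          simp only [pvRRFor]
          rw [if_pos hbr]
        rw [hA, hR]
        refine ⟨hkeys1, ?_, ?_, rfl⟩
        · simp only [List.map_cons, List.cons.injEq]
          exact ⟨PySem.Dict.getD_insert_self d k gs [], hmapeq⟩
        · intro j hj
          exact PySem.Dict.getD_insert_of_ne d gs [] (fun he => hj (he ▸ List.mem_cons_self))
      · have hA : pvAFor maxE (k :: rest) d ex = pvAFor maxE rest (d.insert k gs) (ex ++ [x]) := by
          simp only [pvAFor]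
          rw [hg]
          dsimp only
          rw [if_neg hbr]
        have hR : pvRRFor maxE ((k :: rest).map (fun k => d.getD k [])) ex
            = (gs :: (pvRRFor maxE (rest.map (fun k => d.getD k [])) (ex ++ [x])).1,
               (pvRRFor maxE (rest.map (fun k => d.getD k [])) (ex ++ [x])).2) := by
          rw [List.map_cons, hg]
          simp only [pvRRFor]
          rw [if_neg hbr]
        have hcr : ∀ k' ∈ rest, (d.insert k gs).contains k' = true := by
          intro k' h'
          rw [PySem.Dict.contains_insert, hc k' (List.mem_cons_of_mem _ h')]
          simp
        obtain ⟨i1, i2, i3, i4⟩ := ih (d.insert k gs) (ex ++ [x]) hndr hcr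
        rw [hmapeq] at i2 i4
        refine ⟨by rw [hA, i1]; exact hkeys1, ?_, ?_, ?_⟩
        · rw [hA, hR]
          simp only [List.map_cons, List.cons.injEq]
          refine ⟨?_, i2⟩
          rw [i3 k hkrest]
          exact PySem.Dict.getD_insert_self d k gs []
        · intro j hj
          rw [hA, i3 j (fun h' => hj (List.mem_cons_of_mem _ h'))]
          exact PySem.Dict.getD_insert_of_ne d gs [] (fun he => hj (he ▸ List.mem_cons_self))
        · rw [hA, hR]; exact i4

lemma pvAWhile_spec (maxE : Int) : ∀ (fuel : Nat) (d : PySem.Dict String (List (List (String × String))))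
    (ex : List (List (String × String))), d.keys.Nodup →
    pvAWhile maxE d.keys fuel d ex = pvRRWhile maxE fuel (d.keys.map (fun k => d.getD k [])) ex := by
  intro fuel
  induction fuel with
  | zero => intro d ex _; simp [pvAWhile, pvRRWhile]
  | succ fuel ih =>
    intro d ex hnd
    have hvals : d.values = d.keys.map (fun k => d.getD k []) := PySem.Dict.values_eq_map_keys d hnd []
    simp only [pvAWhile, pvRRWhile, hvals]
    split
    · obtain ⟨h1, h2, h3, h4⟩ := pvAFor_spec maxE d.keys d ex hnd
        (fun k h => (PySem.Dict.contains_iff_mem_keys d k).mpr h)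
      have hnd' : (pvAFor maxE d.keys d ex).1.keys.Nodup := by rw [h1]; exact hnd
      calc pvAWhile maxE d.keys fuel (pvAFor maxE d.keys d ex).1 (pvAFor maxE d.keys d ex).2
          = pvAWhile maxE (pvAFor maxE d.keys d ex).1.keys fuel (pvAFor maxE d.keys d ex).1 (pvAFor maxE d.keys d ex).2 := by rw [h1]
        _ = pvRRWhile maxE fuel ((pvAFor maxE d.keys d ex).1.keys.map (fun k => (pvAFor maxE d.keys d ex).1.getD k [])) (pvAFor maxE d.keys d ex).2 := ih _ _ hnd'
        _ = pvRRWhile maxE fuel (pvRRFor maxE (d.keys.map (fun k => d.getD k [])) ex).1 (pvRRFor maxE (d.keys.map (fun k => d.getD k [])) ex).2 := by rw [h1, h2, h4]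
    · rfl

lemma pvG_nodup (l : List (List (String × String))) :
    ∀ (d : PySem.Dict String (List (List (String × String)))), d.keys.Nodup →
    (l.foldl (fun d correction =>
      let decision := (PySem.Dict.mk correction).getD "review_decision" ""
      let d := if d.contains decision then d else d.insert decision []
      d.modify decision [] (fun g => g ++ [correction])) d).keys.Nodup := by
  induction l with
  | nil => intro d h; simpa using h
  | cons c rest ih =>
    intro d h
    simp only [List.foldl_cons]
    apply ih
    have h1 : (if d.contains ((PySem.Dict.mk c).getD "review_decision" "") then d
        else d.insert ((PySem.Dict.mk c).getD "review_decision" "") []).keys.Nodup := by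
      split
      · exact h
      · exact PySem.Dict.nodup_keys_insert d _ _ h
    rw [PySem.Dict.keys_modify]
    exact PySem.Dict.nodup_keys_insert _ _ _ h1

-- ===== VERDICT (by name: the statement is the Claim_ definition above) =====
theorem create_fewshot_examples_spec : Claim_equal_create_fewshot_examples := by
  intro corrections max_examples _ _
  unfold Spec_create_fewshot_examples create_fewshot_examples create_fewshot_examples_alt
  set G := corrections.foldl (fun d correction =>
    let decision := (PySem.Dict.mk correction).getD "review_decision" ""
    let d := if d.contains decision then d else d.insert decision []
    d.modify decision [] (fun g => g ++ [correction])) PySem.Dict.empty with hG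
  have hnd : G.keys.Nodup := pvG_nodup corrections PySem.Dict.empty (by simp [PySem.Dict.keys_empty])
  have hvals : G.values = G.keys.map (fun k => G.getD k []) := PySem.Dict.values_eq_map_keys G hnd []
  rw [pvAWhile_spec max_examples _ G [] hnd, ← hvals,
      pvRRWhile_take max_examples _ G.values [] (le_refl _)]
  have harg : (max_examples - (([] : List (List (String × String))).length : Int)).toNat
      = (max 0 max_examples).toNat := by simp; omega
  rw [harg]
  simp only [List.nil_append]
  rfl
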